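-- pv_equiv track=rewrite | github.com/LilJiggly/Dutch-Museums | scraping/scrape_detail_pages.py | expand_days
-- ===== SOURCE A (Python) =====
-- day_aliases = {
--     "mon": "Monday", "tue": "Tuesday", "wed": "Wednesday",
--     "thu": "Thursday", "fri": "Friday", "sat": "Saturday", "sun": "Sunday",
--     "monday": "Monday", "tuesday": "Tuesday", "wednesday": "Wednesday",
--     "thursday": "Thursday", "friday": "Friday", "saturday": "Saturday", "sunday": "Sunday"
-- }
--
-- def expand_days(day_part):
--     days = list(day_aliases.keys())[:7]  # Only use short forms for range detection
--     parts = [p.strip().lower() for p in day_part.strip().split('-')]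
--     if len(parts) == 2:
--         try:
--             i1 = days.index(parts[0])
--             i2 = days.index(parts[1])
--             if i1 <= i2:
--                 return [day_aliases[d] for d in days[i1:i2+1]]
--             else:
--                 return [day_aliases[d] for d in days[i1:] + days[:i2+1]]
--         except ValueError:
--             return []
--     elif len(parts) == 1:
--         return [day_aliases.get(parts[0], "")]
--     return []
-- ===== SOURCE B (Python) =====
-- NEXT = {"mon": "tue", "tue": "wed", "wed": "thu", "thu": "fri",
--         "fri": "sat", "sat": "sun", "sun": "mon"}
-- NAME = {
--     "mon": "Monday", "tue": "Tuesday", "wed": "Wednesday",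
--     "thu": "Thursday", "fri": "Friday", "sat": "Saturday", "sun": "Sunday",
--     "monday": "Monday", "tuesday": "Tuesday", "wednesday": "Wednesday",
--     "thursday": "Thursday", "friday": "Friday", "saturday": "Saturday", "sunday": "Sunday"
-- }
--
--
-- def expand_days(day_part):
--     parts = [p.strip().lower() for p in day_part.strip().split('-')]
--     if len(parts) == 2:
--         start, end = parts
--         if start not in NEXT or end not in NEXT:
--             return []
--         out = []
--         d = start
--         while True:
--             out.append(NAME[d])
--             if d == end:
--                 return out
--             d = NEXT[d]
--     if len(parts) == 1:
--         return [NAME.get(parts[0], "")]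
--     return []
-- ===== Notes on version B (the rewrite author's own statement) =====
-- stated objective: alternative
-- what changed: Replaces A's index-based slice-and-concatenate over the key list (with try/except around days.index) by an index-free walk along a successor map of the weekly cycle: start at the first day and follow NEXT links, appending names, until the end day is reached.
import Mathlib
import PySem

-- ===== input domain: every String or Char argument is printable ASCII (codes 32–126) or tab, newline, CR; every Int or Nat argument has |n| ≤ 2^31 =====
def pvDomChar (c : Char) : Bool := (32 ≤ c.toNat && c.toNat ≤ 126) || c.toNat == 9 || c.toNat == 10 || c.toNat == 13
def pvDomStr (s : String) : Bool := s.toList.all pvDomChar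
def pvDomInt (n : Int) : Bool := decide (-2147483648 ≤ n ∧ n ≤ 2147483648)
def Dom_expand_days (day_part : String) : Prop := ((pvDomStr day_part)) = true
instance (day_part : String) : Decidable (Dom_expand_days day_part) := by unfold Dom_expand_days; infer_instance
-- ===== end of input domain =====

-- B replaces A's index/slice range expansion by an index-free walk along a successor
-- map of the weekly cycle (objective: alternative; same behaviour, proved equal).

-- ===== PORT A =====
def pvAliases : PySem.Dict String String := PySem.Dict.ofList
  [("mon", "Monday"), ("tue", "Tuesday"), ("wed", "Wednesday"),
   ("thu", "Thursday"), ("fri", "Friday"), ("sat", "Saturday"), ("sun", "Sunday"),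
   ("monday", "Monday"), ("tuesday", "Tuesday"), ("wednesday", "Wednesday"),
   ("thursday", "Thursday"), ("friday", "Friday"), ("saturday", "Saturday"), ("sunday", "Sunday")]

def expand_days (day_part : String) : List String :=
  -- days = list(day_aliases.keys())[:7]
  let days := PySem.List.slice pvAliases.keys none (some 7)
  -- parts = [p.strip().lower() for p in day_part.strip().split('-')]
  let parts := ((PySem.Str.split? (PySem.Str.strip day_part) "-").getD []).map
    (fun p => PySem.Str.lower (PySem.Str.strip p))
  if parts.length = 2 then
    match PySem.List.index? days (parts.getD 0 ""), PySem.List.index? days (parts.getD 1 "") with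
    | some i1, some i2 =>
        if i1 ≤ i2 then
          (PySem.List.slice days (some (i1 : Int)) (some ((i2 : Int) + 1))).map
            (fun d => pvAliases.getD d "")
        else
          (PySem.List.slice days (some (i1 : Int)) none ++
           PySem.List.slice days none (some ((i2 : Int) + 1))).map
            (fun d => pvAliases.getD d "")
    | _, _ => []  -- ValueError from days.index
  else if parts.length = 1 then
    [pvAliases.getD (parts.getD 0 "") ""]
  else
    []

-- ===== PORT B =====
def pvNext : PySem.Dict String String := PySem.Dict.ofList
  [("mon", "tue"), ("tue", "wed"), ("wed", "thu"), ("thu", "fri"),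
   ("fri", "sat"), ("sat", "sun"), ("sun", "mon")]

def pvName : PySem.Dict String String := PySem.Dict.ofList
  [("mon", "Monday"), ("tue", "Tuesday"), ("wed", "Wednesday"),
   ("thu", "Thursday"), ("fri", "Friday"), ("sat", "Saturday"), ("sun", "Sunday"),
   ("monday", "Monday"), ("tuesday", "Tuesday"), ("wednesday", "Wednesday"),
   ("thursday", "Thursday"), ("friday", "Friday"), ("saturday", "Saturday"), ("sunday", "Sunday")]

-- the Python `while True` walk; it runs at most 7 iterations when `end` is a valid
-- short day (the cycle has 7 nodes), so fuel 7 is exact there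
def pvWalk : Nat → String → String → List String
  | 0, _, _ => []
  | n + 1, d, stop =>
      pvName.getD d "" :: (if d = stop then [] else pvWalk n (pvNext.getD d "") stop)

def expand_days_alt (day_part : String) : List String :=
  let parts := ((PySem.Str.split? (PySem.Str.strip day_part) "-").getD []).map
    (fun p => PySem.Str.lower (PySem.Str.strip p))
  if parts.length = 2 then
    let start := parts.getD 0 ""
    let stop := parts.getD 1 ""
    if pvNext.contains start && pvNext.contains stop then pvWalk 7 start stop
    else []
  else if parts.length = 1 then
    [pvName.getD (parts.getD 0 "") ""]
  else []

-- ===== PRECONDITION & SPEC =====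
def Spec_expand_days (day_part : String) (out : List String) : Prop := out = expand_days_alt day_part
instance (day_part : String) (out : List String) : Decidable (Spec_expand_days day_part out) := by unfold Spec_expand_days; infer_instance

-- ===== CLAIM (what is proved, stated in full; the proofs are below) =====
def Claim_equal_expand_days : Prop := ∀ (day_part : String), Dom_expand_days day_part → Spec_expand_days day_part (expand_days day_part)

-- ===== LEMMAS AND PROOFS =====

-- both ports branch on the same `parts`; factor the body over an arbitrary parts list
def pvBodyA (parts : List String) : List String :=
  let days := PySem.List.slice pvAliases.keys none (some 7)
  if parts.length = 2 then
    match PySem.List.index? days (parts.getD 0 ""), PySem.List.index? days (parts.getD 1 "") with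
    | some i1, some i2 =>
        if i1 ≤ i2 then
          (PySem.List.slice days (some (i1 : Int)) (some ((i2 : Int) + 1))).map
            (fun d => pvAliases.getD d "")
        else
          (PySem.List.slice days (some (i1 : Int)) none ++
           PySem.List.slice days none (some ((i2 : Int) + 1))).map
            (fun d => pvAliases.getD d "")
    | _, _ => []
  else if parts.length = 1 then
    [pvAliases.getD (parts.getD 0 "") ""]
  else
    []

def pvBodyB (parts : List String) : List String :=
  if parts.length = 2 then
    let start := parts.getD 0 ""
    let stop := parts.getD 1 ""
    if pvNext.contains start && pvNext.contains stop then pvWalk 7 start stop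
    else []
  else if parts.length = 1 then
    [pvName.getD (parts.getD 0 "") ""]
  else []

lemma pvA_eq_body (s : String) : expand_days s =
    pvBodyA (((PySem.Str.split? (PySem.Str.strip s) "-").getD []).map
      (fun p => PySem.Str.lower (PySem.Str.strip p))) := rfl

lemma pvB_eq_body (s : String) : expand_days_alt s =
    pvBodyB (((PySem.Str.split? (PySem.Str.strip s) "-").getD []).map
      (fun p => PySem.Str.lower (PySem.Str.strip p))) := rfl

def pvDays : List String := ["mon", "tue", "wed", "thu", "fri", "sat", "sun"]

lemma pvDaysA_eq : PySem.List.slice pvAliases.keys none (some 7) = pvDays := by decide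

lemma pvNextKeys : pvNext.keys = pvDays := by decide

lemma pvTwo (p0 p1 : String) : pvBodyA [p0, p1] = pvBodyB [p0, p1] := by
  by_cases h0 : p0 ∈ pvDays
  · by_cases h1 : p1 ∈ pvDays
    · fin_cases h0 <;> fin_cases h1 <;> decide
    · have hi : List.idxOf? p1 pvDays = none := by
        rw [← PySem.List.index?_eq_idxOf?]
        exact Iff.mpr (PySem.List.index?_eq_none_iff pvDays p1) h1
      have hc : pvNext.contains p1 = false := by
        rw [PySem.Dict.contains_eq_decide_mem_keys, pvNextKeys]; simpa using h1
      have hs : (PySem.List.index? pvDays p0).isSome :=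
        Iff.mpr (PySem.List.index?_isSome_iff pvDays p0) h0
      rw [PySem.List.index?_eq_idxOf?] at hs
      obtain ⟨i1, hi1⟩ := Option.isSome_iff_exists.mp hs
      simp [pvBodyA, pvBodyB, pvDaysA_eq, hi, hi1, hc]
  · have hi : List.idxOf? p0 pvDays = none := by
      rw [← PySem.List.index?_eq_idxOf?]
      exact Iff.mpr (PySem.List.index?_eq_none_iff pvDays p0) h0
    have hc : pvNext.contains p0 = false := by
      rw [PySem.Dict.contains_eq_decide_mem_keys, pvNextKeys]; simpa using h0
    simp [pvBodyA, pvBodyB, pvDaysA_eq, hi, hc]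

-- pvName's defining list is the same as pvAliases', so the single-part lookups agree
lemma pvOne (p : String) : pvBodyA [p] = pvBodyB [p] := rfl

lemma pvBody_eq (parts : List String) : pvBodyA parts = pvBodyB parts := by
  match parts with
  | [] => rfl
  | [p] => exact pvOne p
  | [p0, p1] => exact pvTwo p0 p1
  | p0 :: p1 :: p2 :: rest =>
    simp only [pvBodyA, pvBodyB, List.length_cons]
    rw [if_neg (by omega), if_neg (by omega), if_neg (by omega), if_neg (by omega)]

-- ===== VERDICT (by name: the statement is the Claim_ definition above) =====
theorem expand_days_spec : Claim_equal_expand_days := by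
  intro s _
  unfold Spec_expand_days
  rw [pvA_eq_body, pvB_eq_body, pvBody_eq]
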